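-- pv_equiv track=rewrite | github.com/reko-beep/chongyun-bot | scripts_to_update_database/materials.py | correct_text
-- ===== SOURCE A (Python) =====
-- def correct_text(text_list: list):
--     text = []
--     counter = 0
--     list_ =  [t.strip() for t in text_list if t.strip() != '']
--     for li in range(len(list_) // 2):
--         tex = ' '.join(list_[li * 2: (li*2)+2])
--         text.append(tex)
--     return text
-- ===== SOURCE B (Python) =====
-- def correct_text(text_list: list):
--     # single pass: strip, skip empties, and pair on the fly with a pending slot
--     out = []
--     pending = None
--     for t in text_list:
--         s = t.strip()
--         if s == '':
--             continue
--         if pending is None: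
--             pending = s
--         else:
--             out.append(pending + ' ' + s)
--             pending = None
--     return out
-- ===== Notes on version B (the rewrite author's own statement) =====
-- stated objective: alternative
-- what changed: Replaced A's two staged passes (build a cleaned list, then index it with range(len//2) and slices) by a single fold over the raw input that strips, filters and pairs on the fly with a 'pending' accumulator, never materialising the cleaned list or using indices.
import Mathlib
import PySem

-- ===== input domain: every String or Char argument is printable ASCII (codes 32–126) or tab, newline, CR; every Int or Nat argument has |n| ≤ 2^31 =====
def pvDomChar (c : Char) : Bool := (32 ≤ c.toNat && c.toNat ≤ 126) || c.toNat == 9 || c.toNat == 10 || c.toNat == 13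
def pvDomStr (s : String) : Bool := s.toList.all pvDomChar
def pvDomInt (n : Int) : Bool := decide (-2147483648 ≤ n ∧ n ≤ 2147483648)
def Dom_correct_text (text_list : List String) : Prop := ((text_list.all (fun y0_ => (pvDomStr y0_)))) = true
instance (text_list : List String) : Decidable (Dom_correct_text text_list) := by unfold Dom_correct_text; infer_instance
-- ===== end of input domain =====

-- B replaces A's two staged passes (clean list, then index-and-slice pairing) by ONE fold over
-- the raw input with a 'pending' accumulator that strips, filters and pairs on the fly.

-- ===== PORT A =====
def correct_text (text_list : List String) : List String :=
  -- list_ = [t.strip() for t in text_list if t.strip() != '']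
  let list_ : List String :=
    text_list.foldl (fun acc t =>
      if PySem.Str.strip t ≠ "" then acc ++ [PySem.Str.strip t] else acc) []
  -- for li in range(len(list_) // 2): text.append(' '.join(list_[li*2 : li*2+2]))
  (PySem.List.pyRange 0 (PySem.Int.floordiv (list_.length : Int) 2) 1).foldl
    (fun text li =>
      text ++ [PySem.Str.join " " (PySem.List.slice list_ (some (li * 2)) (some (li * 2 + 2)))]) []

-- ===== PORT B =====
-- one pass: state = (pending, out); strip, skip '', pair with the pending slot
def correct_text_alt (text_list : List String) : List String :=
  (text_list.foldl (fun st t =>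
      let s := PySem.Str.strip t
      if s = "" then st
      else match st.1 with
        | none => (some s, st.2)
        | some a => (none, st.2 ++ [a ++ " " ++ s]))
    ((none : Option String), ([] : List String))).2

-- ===== PRECONDITION & SPEC =====
def Spec_correct_text (text_list : List String) (out : List String) : Prop := out = correct_text_alt text_list
instance (text_list : List String) (out : List String) : Decidable (Spec_correct_text text_list out) := by unfold Spec_correct_text; infer_instance

-- ===== CLAIM =====
def Claim_equal_correct_text : Prop := ∀ (text_list : List String), Dom_correct_text text_list → Spec_correct_text text_list (correct_text text_list)

-- ===== LEMMAS AND PROOFS =====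

-- the cleaned list (both versions' strip-and-filter, as a filterMap)
def pvClean (text_list : List String) : List String :=
  text_list.filterMap (fun t =>
    let s := PySem.Str.strip t
    if s ≠ "" then some s else none)

-- A's cleaning loop builds pvClean
theorem clean_eq (text_list : List String) :
    text_list.foldl (fun acc t =>
      if PySem.Str.strip t ≠ "" then acc ++ [PySem.Str.strip t] else acc) [] =
    pvClean text_list := by
  have aux : ∀ (ts : List String) (acc : List String),
      ts.foldl (fun acc t =>
        if PySem.Str.strip t ≠ "" then acc ++ [PySem.Str.strip t] else acc) acc =
      acc ++ pvClean ts := by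
    intro ts
    induction ts with
    | nil => intro acc; simp [pvClean]
    | cons t ts ih =>
      intro acc
      rw [List.foldl_cons, ih]
      by_cases h : PySem.Str.strip t = "" <;> simp [pvClean, h]
  simpa using aux text_list []

-- the pairing of a (clean) list with an optional pending element
def pvPairAux : Option String → List String → List String
  | _, [] => []
  | none, x :: r => pvPairAux (some x) r
  | some a, x :: r => (a ++ " " ++ x) :: pvPairAux none r

theorem join_two (a b : String) : PySem.Str.join " " [a, b] = a ++ " " ++ b := by
  apply String.toList_injective
  simp [PySem.Str.join, PySem.Chars.join_cons_cons, PySem.Chars.join_singleton]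

-- A's slice pairing over range(len/2) equals pvPairAux none
theorem pairs_eq : ∀ (l : List String),
    ((List.range (l.length / 2)).map
      (fun k => PySem.Str.join " " ((l.drop (2 * k)).take 2))) = pvPairAux none l
  | [] => by simp [pvPairAux]
  | [a] => by simp [pvPairAux]
  | a :: b :: rest => by
    have ih := pairs_eq rest
    have hlen : (a :: b :: rest).length / 2 = rest.length / 2 + 1 := by
      simp [List.length_cons]; omega
    rw [hlen, List.range_succ_eq_map, List.map_cons, List.map_map]
    show PySem.Str.join " " [a, b] :: _ = _
    rw [join_two]
    unfold pvPairAux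
    congr 1

-- B's single pass computes pvPairAux of the cleaned list
theorem foldB_eq : ∀ (ts : List String) (p : Option String) (out : List String),
    (ts.foldl (fun st t =>
      let s := PySem.Str.strip t
      if s = "" then st
      else match st.1 with
        | none => (some s, st.2)
        | some a => (none, st.2 ++ [a ++ " " ++ s])) (p, out)).2 =
    out ++ pvPairAux p (pvClean ts)
  | [], p, out => by cases p <;> simp [pvClean, pvPairAux]
  | t :: ts, p, out => by
    rw [List.foldl_cons]
    by_cases h : PySem.Str.strip t = ""
    · simpa [h, pvClean] using foldB_eq ts p out
    · cases p with
      | none => simpa [h, pvClean, pvPairAux] using foldB_eq ts (some (PySem.Str.strip t)) out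
      | some a => simpa [h, pvClean, pvPairAux] using foldB_eq ts none (out ++ [a ++ " " ++ PySem.Str.strip t])

-- ===== VERDICT =====
theorem correct_text_spec : Claim_equal_correct_text := by
  intro text_list _
  unfold Spec_correct_text correct_text correct_text_alt
  rw [clean_eq, foldB_eq]
  set l := pvClean text_list with hl
  rw [PySem.List.foldl_append_singleton_eq_map]
  rw [show PySem.Int.floordiv (l.length : Int) 2 = ((l.length / 2 : Nat) : Int) from
    PySem.Int.floordiv_natCast l.length 2]
  rw [PySem.List.pyRange_zero_nat, List.map_map]
  rw [← pairs_eq l]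
  simp only [List.nil_append]
  apply List.map_congr_left
  intro k _
  simp only [Function.comp]
  rw [PySem.List.slice_toNat]
  · have hk : ((k : Int) * 2).toNat = 2 * k := by omega
    have hk2 : ((k : Int) * 2 + 2).toNat = 2 * k + 2 := by omega
    rw [hk, hk2]
    have h3 : 2 * k + 2 - 2 * k = 2 := by omega
    rw [h3]
  · positivity
  · positivity
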